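-- pv_equiv track=rewrite | github.com/frezilla/advent-of-code | 2015/day_11/main.py | check_increasing_straight
-- ===== SOURCE A (Python) =====
-- def check_increasing_straight(password):
--     password_length = len(password)
--     previous_ascii = -1
--     size = 0
--     for i in range(password_length):
--         current_ascii = ord(password[i])
--         if previous_ascii + 1 == current_ascii:
--             size += 1
--         else:
--             size = 0
--         if size >= 3:
--             return True
--         previous_ascii = current_ascii
--     return size >= 3
-- ===== SOURCE B (Python) =====
-- def check_increasing_straight(password):
--     for i in range(len(password) - 3):
--         if (ord(password[i]) + 1 == ord(password[i + 1])
--                 and ord(password[i + 1]) + 1 == ord(password[i + 2])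
--                 and ord(password[i + 2]) + 1 == ord(password[i + 3])):
--             return True
--     return False
-- ===== Notes on version B (the rewrite author's own statement) =====
-- stated objective: simpler
-- what changed: Replaced the running counter with previous-character state by a slide of a fixed 4-character window checking three +1 steps directly, returning on the first match.
import Mathlib
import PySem

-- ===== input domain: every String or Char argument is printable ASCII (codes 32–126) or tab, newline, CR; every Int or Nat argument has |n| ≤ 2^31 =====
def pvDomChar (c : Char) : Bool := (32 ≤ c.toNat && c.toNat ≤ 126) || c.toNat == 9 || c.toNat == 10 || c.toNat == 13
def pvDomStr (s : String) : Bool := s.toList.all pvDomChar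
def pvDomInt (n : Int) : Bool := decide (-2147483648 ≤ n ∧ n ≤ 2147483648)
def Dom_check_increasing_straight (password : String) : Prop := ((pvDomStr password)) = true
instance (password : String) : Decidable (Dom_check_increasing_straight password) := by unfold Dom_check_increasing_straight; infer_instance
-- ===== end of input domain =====

-- B replaces A's running counter + previous-character state by a sliding 4-character
-- window that checks the three +1 steps directly (simpler decomposition, same cost).

-- ===== PORT A =====
-- A's for-loop with early return: recursion over the characters carrying
-- (previous_ascii, size), exactly A's state.
def caLoop (prev size : Int) : List Char → Bool
  | [] => decide (3 ≤ size)
  | c :: rest =>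
    let cur : Int := c.toNat
    let size' : Int := if prev + 1 = cur then size + 1 else 0
    if 3 ≤ size' then true else caLoop cur size' rest

def check_increasing_straight (password : String) : Bool :=
  caLoop (-1) 0 password.toList

-- ===== PORT B =====
-- B's sliding window: look at 4 consecutive characters, return True on the first
-- match, advance by one otherwise.
def cbLoop : List Char → Bool
  | a :: b :: c :: d :: rest =>
    if ((a.toNat : Int) + 1 = b.toNat ∧ (b.toNat : Int) + 1 = c.toNat ∧ (c.toNat : Int) + 1 = d.toNat) then
      true
    else
      cbLoop (b :: c :: d :: rest)
  | _ => false
termination_by l => l.length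

def check_increasing_straight_alt (password : String) : Bool :=
  cbLoop password.toList

-- ===== PRECONDITION & SPEC =====
def Spec_check_increasing_straight (password : String) (out : Bool) : Prop := out = check_increasing_straight_alt password
instance (password : String) (out : Bool) : Decidable (Spec_check_increasing_straight password out) := by unfold Spec_check_increasing_straight; infer_instance

-- ===== CLAIM (what is proved, stated in full; the proofs are below) =====
def Claim_equal_check_increasing_straight : Prop := ∀ (password : String), Dom_check_increasing_straight password → Spec_check_increasing_straight password (check_increasing_straight password)

-- ===== LEMMAS AND PROOFS =====

/-- `runFrom prev n l`: the first `n` characters of `l` each continue a +1 run from `prev`. -/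
def runFrom (prev : Int) : Nat → List Char → Bool
  | 0, _ => true
  | _ + 1, [] => false
  | n + 1, c :: rest => decide (prev + 1 = (c.toNat : Int)) && runFrom (c.toNat : Int) n rest

lemma runFrom_mono (n : Nat) : ∀ (m : Nat) (p : Int) (l : List Char),
    n ≤ m → runFrom p m l = true → runFrom p n l = true := by
  induction n with
  | zero => intro m p l _ _; rfl
  | succ n ih =>
    intro m p l hnm hm
    obtain ⟨m', rfl⟩ : ∃ m', m = m' + 1 := ⟨m - 1, by omega⟩
    cases l with
    | nil => simp [runFrom] at hm
    | cons c rest =>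
      simp only [runFrom, Bool.and_eq_true] at hm ⊢
      exact ⟨hm.1, ih m' _ rest (by omega) hm.2⟩

lemma cbLoop_cons (c : Char) (rest : List Char) :
    cbLoop (c :: rest) = (runFrom (c.toNat : Int) 3 rest || cbLoop rest) := by
  match rest with
  | [] => simp [cbLoop, runFrom]
  | [b] => simp [cbLoop, runFrom]
  | [b, c2] => simp [cbLoop, runFrom]
  | b :: c2 :: d :: t =>
    by_cases h : ((c.toNat : Int) + 1 = b.toNat ∧ (b.toNat : Int) + 1 = c2.toNat ∧ (c2.toNat : Int) + 1 = d.toNat)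
    · simp [cbLoop, runFrom, h.1, h.2.1, h.2.2]
    · have : ¬ ((c.toNat : Int) + 1 = b.toNat ∧ (b.toNat : Int) + 1 = c2.toNat ∧ (c2.toNat : Int) + 1 = d.toNat) := h
      simp only [cbLoop, if_neg this]
      simp only [runFrom]
      by_cases h1 : (c.toNat : Int) + 1 = b.toNat
      · by_cases h2 : (b.toNat : Int) + 1 = c2.toNat
        · by_cases h3 : (c2.toNat : Int) + 1 = d.toNat
          · exact absurd ⟨h1, h2, h3⟩ h
          · simp [h1, h2, h3]
        · simp [h1, h2]
      · simp [h1]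

lemma caLoop_eq (l : List Char) : ∀ (prev : Int) (k : Nat), 1 ≤ k → k ≤ 3 →
    caLoop prev (3 - (k : Int)) l = (runFrom prev k l || cbLoop l) := by
  induction l with
  | nil =>
    intro prev k h1 h3
    obtain ⟨k', rfl⟩ : ∃ k', k = k' + 1 := ⟨k - 1, by omega⟩
    simp only [caLoop, runFrom, cbLoop]
    simp only [Bool.or_false]
    rw [decide_eq_false]
    push_cast; omega
  | cons c rest ih =>
    intro prev k h1 h3
    simp only [caLoop]
    by_cases hp : prev + 1 = (c.toNat : Int)
    · rw [if_pos hp]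
      by_cases hk : k = 1
      · subst hk
        rw [if_pos (by norm_num)]
        obtain ⟨k0, rfl⟩ : (1 : Nat) = 0 + 1 := rfl
        simp [runFrom, hp]
      · rw [if_neg (by omega)]
        have hsz : (3 : Int) - (k : Int) + 1 = 3 - ((k - 1 : Nat) : Int) := by omega
        rw [hsz, ih (c.toNat : Int) (k - 1) (by omega) (by omega)]
        obtain ⟨k', rfl⟩ : ∃ k', k = k' + 1 := ⟨k - 1, by omega⟩
        simp only [Nat.add_sub_cancel]
        rw [cbLoop_cons]
        simp only [runFrom, decide_eq_true hp, Bool.true_and]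
        by_cases h3r : runFrom (c.toNat : Int) 3 rest = true
        · have := runFrom_mono k' 3 (c.toNat : Int) rest (by omega) h3r
          simp [this, h3r]
        · simp [Bool.not_eq_true] at h3r
          simp [h3r]
    · rw [if_neg hp, if_neg (by norm_num)]
      have h0 : caLoop (c.toNat : Int) 0 rest = (runFrom (c.toNat : Int) 3 rest || cbLoop rest) := by
        have := ih (c.toNat : Int) 3 (by omega) (by omega)
        norm_num at this
        exact this
      rw [h0, cbLoop_cons]
      obtain ⟨k', rfl⟩ : ∃ k', k = k' + 1 := ⟨k - 1, by omega⟩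
      simp [runFrom, hp]

lemma runFrom_start_false (l : List Char) (h : l.all pvDomChar = true) :
    runFrom (-1) 3 l = false := by
  cases l with
  | nil => rfl
  | cons c rest =>
    simp only [List.all_cons, Bool.and_eq_true, pvDomChar] at h
    have hc : 9 ≤ c.toNat := by
      rcases h with ⟨h1, _⟩
      simp only [Bool.or_eq_true, Bool.and_eq_true, beq_iff_eq, decide_eq_true_eq] at h1
      omega
    simp only [runFrom, Bool.and_eq_false_iff]
    left
    simp only [decide_eq_false_iff_not]
    push_cast
    omega

-- ===== VERDICT (by name: the statement is the Claim_ definition above) =====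
theorem check_increasing_straight_spec : Claim_equal_check_increasing_straight := by
  intro password hdom
  unfold Spec_check_increasing_straight check_increasing_straight check_increasing_straight_alt
  have h := caLoop_eq password.toList (-1) 3 (by omega) (by omega)
  norm_num at h
  have hall : password.toList.all pvDomChar = true := by
    unfold Dom_check_increasing_straight pvDomStr at hdom
    exact hdom
  rw [h, runFrom_start_false password.toList hall]
  simp
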